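-- pv_equiv track=rewrite | github.com/qwas15788hj/Baekjoon | 프로그래머스/lv3/12987. 숫자 게임/숫자 게임.py | solution
-- ===== SOURCE A (Python) =====
-- def solution(A, B):
--     answer = 0
--
--     A.sort()  # A를 정렬
--     B.sort()  # B를 정렬
--
--     for a in A:
--         # A에서 가장 작은 숫자를 선택
--         # B에서 A의 현재 숫자보다 큰 숫자 중 가장 작은 숫자와 비교
--         # 승점을 얻을 수 있다면 승점을 증가시키고 해당 숫자는 사용된 것으로 처리
--         for b in B:
--             if b > a:
--                 answer += 1
--                 B.remove(b)
--                 break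
--
--     return answer
-- ===== SOURCE B (Python) =====
-- def solution(A, B):
--     # sort both, then one two-pointer greedy scan: each a takes the smallest
--     # remaining b that beats it.  (Unlike A, does not mutate its arguments.)
--     A = sorted(A)
--     B = sorted(B)
--     ans = 0
--     j = 0
--     for a in A:
--         while j < len(B) and B[j] <= a:
--             j += 1
--         if j < len(B):
--             ans += 1
--             j += 1
--     return ans
-- ===== Notes on version B (the rewrite author's own statement) =====
-- stated objective: faster
-- what changed: replaces the per-element inner scan of B plus list.remove (O(n^2)) with a single two-pointer sweep over both sorted lists
import Mathlib
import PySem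

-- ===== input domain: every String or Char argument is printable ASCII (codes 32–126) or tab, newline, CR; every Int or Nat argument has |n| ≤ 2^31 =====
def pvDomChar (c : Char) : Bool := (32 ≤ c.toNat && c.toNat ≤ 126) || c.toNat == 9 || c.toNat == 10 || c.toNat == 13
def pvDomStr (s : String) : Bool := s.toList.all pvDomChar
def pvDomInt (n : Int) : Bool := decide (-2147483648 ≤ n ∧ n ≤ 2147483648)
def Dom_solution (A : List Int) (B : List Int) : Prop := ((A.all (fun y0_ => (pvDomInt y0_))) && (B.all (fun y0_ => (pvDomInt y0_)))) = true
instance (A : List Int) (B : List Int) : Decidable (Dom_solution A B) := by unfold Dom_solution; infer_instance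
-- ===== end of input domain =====

-- B replaces A's inner scan over B plus list.remove with one two-pointer sweep of both
-- sorted lists (asymptotically faster); equivalence is about the RETURN value only:
-- Python A sorts both arguments in place and removes from B, Python B does not mutate.

-- ===== PORT A =====
-- inner loop 'for b in B: if b > a: … break' — the first b with b > a, if any
def pvFirstGT (a : Int) : List Int → Option Int
  | [] => none
  | b :: bs => if a < b then some b else pvFirstGT a bs

-- outer loop 'for a in A' with the mutable list B as state
def pvGoA : List Int → List Int → Int
  | [], _ => 0
  | a :: as, bs =>
    match pvFirstGT a bs with
    | some b => 1 + pvGoA as ((PySem.List.remove? bs b).getD bs)  -- B.remove(b); b ∈ bs, so getD never defaults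
    | none => pvGoA as bs

def solution (A : List Int) (B : List Int) : Int :=
  pvGoA (PySem.List.sorted A (fun x => x) false) (PySem.List.sorted B (fun x => x) false)

-- ===== PORT B =====
-- 'while j < len(B) and B[j] <= a: j += 1' = drop the ≤ a prefix of the remaining suffix;
-- 'if j < len(B): ans += 1; j += 1' = consume its head if non-empty
def pvGoB : List Int → List Int → Int
  | [], _ => 0
  | a :: as, bs =>
    match bs.dropWhile (fun b => decide (b ≤ a)) with
    | [] => pvGoB as []
    | _ :: rest => 1 + pvGoB as rest

def solution_alt (A : List Int) (B : List Int) : Int :=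
  pvGoB (PySem.List.sorted A (fun x => x) false) (PySem.List.sorted B (fun x => x) false)

-- ===== PRECONDITION & SPEC =====
def Spec_solution (A : List Int) (B : List Int) (out : Int) : Prop := out = solution_alt A B
instance (A : List Int) (B : List Int) (out : Int) : Decidable (Spec_solution A B out) := by unfold Spec_solution; infer_instance

-- ===== CLAIM (what is proved, stated in full; the proofs are below) =====
def Claim_equal_solution : Prop := ∀ (A : List Int) (B : List Int), Dom_solution A B → Spec_solution A B (solution A B)

-- ===== LEMMAS AND PROOFS =====

theorem pvFirstGT_none (a : Int) (l : List Int) (h : ∀ x ∈ l, x ≤ a) :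
    pvFirstGT a l = none := by
  induction l with
  | nil => rfl
  | cons x xs ih =>
    have hx : ¬ a < x := by have := h x (by simp); omega
    simp only [pvFirstGT, if_neg hx]
    exact ih (fun y hy => h y (by simp [hy]))

theorem pvFirstGT_append (a : Int) (P S : List Int) (h : ∀ x ∈ P, x ≤ a) :
    pvFirstGT a (P ++ S) = pvFirstGT a S := by
  induction P with
  | nil => rfl
  | cons x xs ih =>
    have hx : ¬ a < x := by have := h x (by simp); omega
    simp only [List.cons_append, pvFirstGT, if_neg hx]
    exact ih (fun y hy => h y (by simp [hy]))

theorem remove?_append_not_mem (P l : List Int) (v : Int) (h : ∀ x ∈ P, x ≠ v) :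
    PySem.List.remove? (P ++ l) v = (PySem.List.remove? l v).map (P ++ ·) := by
  induction P with
  | nil => simp [Option.map_id']
  | cons x xs ih =>
    have hx : x ≠ v := h x (by simp)
    rw [List.cons_append, PySem.List.remove?_cons_of_ne _ hx,
      ih (fun y hy => h y (by simp [hy]))]
    cases PySem.List.remove? l v <;> rfl

theorem dropWhile_head_false {p : Int → Bool} {S : List Int} {b : Int} {rest : List Int}
    (h : S.dropWhile p = b :: rest) : p b = false := by
  induction S with
  | nil => simp at h
  | cons x xs ih =>
    by_cases hx : p x
    · rw [List.dropWhile_cons_of_pos hx] at h; exact ih h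
    · rw [List.dropWhile_cons_of_neg hx] at h
      cases h; simpa using hx

-- the invariant: A's remaining B is (skipped elements ≤ every remaining a) ++ B's suffix
theorem pvGo_eq (as : List Int) : ∀ (P S : List Int),
    as.Pairwise (· ≤ ·) → S.Pairwise (· ≤ ·) →
    (∀ x ∈ P, ∀ a ∈ as, x ≤ a) →
    pvGoA as (P ++ S) = pvGoB as S := by
  induction as with
  | nil => intro P S _ _ _; rfl
  | cons a as ih =>
    intro P S hAs hS hP
    have hPa : ∀ x ∈ P, x ≤ a := fun x hx => hP x hx a (by simp)
    have haas : ∀ a' ∈ as, a ≤ a' := (List.pairwise_cons.mp hAs).1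
    have hAs' : as.Pairwise (· ≤ ·) := (List.pairwise_cons.mp hAs).2
    have hSd := (List.takeWhile_append_dropWhile (p := fun b => decide (b ≤ a)) (l := S)).symm
    set K := S.takeWhile (fun b => decide (b ≤ a)) with hK
    have hKa : ∀ x ∈ K, x ≤ a := by
      intro x hx
      have := List.mem_takeWhile_imp hx
      simpa using this
    cases hT : S.dropWhile (fun b => decide (b ≤ a)) with
    | nil =>
      have hSa : ∀ x ∈ S, x ≤ a := by
        intro x hx
        have := (List.dropWhile_eq_nil_iff).mp hT x hx
        simpa using this
      have hfind : pvFirstGT a (P ++ S) = none := by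
        apply pvFirstGT_none
        intro x hx
        rcases List.mem_append.mp hx with h | h
        · exact hPa x h
        · exact hSa x h
      simp only [pvGoA, pvGoB, hT, hfind]
      have := ih (P ++ S) [] hAs' (by simp)
        (by intro x hx a' ha'
            have hxa : x ≤ a := by
              rcases List.mem_append.mp hx with h | h
              · exact hPa x h
              · exact hSa x h
            exact le_trans hxa (haas a' ha'))
      simpa using this
    | cons b rest =>
      have hab : a < b := by
        have := dropWhile_head_false hT; simp at this; omega
      have hSsplit : S = K ++ b :: rest := by rw [hSd, hT]
      have hfind : pvFirstGT a (P ++ S) = some b := by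
        rw [pvFirstGT_append a P S hPa, hSsplit, pvFirstGT_append a K _ hKa]
        simp [pvFirstGT, hab]
      have hrem : PySem.List.remove? (P ++ S) b = some ((P ++ K) ++ rest) := by
        rw [hSsplit, ← List.append_assoc, remove?_append_not_mem (P ++ K) (b :: rest) b
          (by intro x hx
              have hxa : x ≤ a := by
                rcases List.mem_append.mp hx with h | h
                · exact hPa x h
                · exact hKa x h
              omega)]
        simp
      have hrestP : rest.Pairwise (· ≤ ·) := by
        have : (b :: rest).Sublist S := hSsplit ▸ (List.sublist_append_right K _)
        exact ((hS.sublist this).sublist (List.sublist_cons_self b rest))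
      simp only [pvGoA, pvGoB, hT, hfind, hrem, Option.getD_some]
      have := ih (P ++ K) rest hAs' hrestP
        (by intro x hx a' ha'
            have hxa : x ≤ a := by
              rcases List.mem_append.mp hx with h | h
              · exact hPa x h
              · exact hKa x h
            exact le_trans hxa (haas a' ha'))
      rw [this]

-- ===== VERDICT (by name: the statement is the Claim_ definition above) =====
theorem solution_spec : Claim_equal_solution := by
  intro A B _
  unfold Spec_solution solution solution_alt
  exact pvGo_eq _ []  _
    (by simpa using PySem.List.sorted_pairwise A (fun x => x))
    (by simpa using PySem.List.sorted_pairwise B (fun x => x))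
    (by simp)
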